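-- pv_equiv track=rewrite | github.com/ayushgoel/PythonScripts | Algo/LeetCode/longest-string-chain.py | is_successor
-- ===== SOURCE A (Python) =====
-- def is_successor(suc, pre):
--     d = False
--     for i in range(26):
--         if suc[i]-pre[i] == 1:
--             if d:
--                 return False
--             d = True
--         elif suc[i]-pre[i] == 0:
--             continue
--         else:
--             return False
--     return d
-- ===== SOURCE B (Python) =====
-- def is_successor(suc, pre):
--     a, b = suc[:26], pre[:26]
--     return any(a == b[:i] + [b[i] + 1] + b[i+1:] for i in range(len(b)))
-- ===== Notes on version B (the rewrite author's own statement) =====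
-- stated objective: alternative
-- what changed: Instead of scanning the 26 differences with a seen-one-+1 flag, B generates each candidate 'pre with one count incremented' and tests whether suc equals any of them (generate-and-test by list equality, no difference vector and no flag).
-- outside the precondition, e.g. on is_successor([1, 0, 0], [0, 0, 0, 0]): A raises IndexError, B returns False
import Mathlib
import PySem

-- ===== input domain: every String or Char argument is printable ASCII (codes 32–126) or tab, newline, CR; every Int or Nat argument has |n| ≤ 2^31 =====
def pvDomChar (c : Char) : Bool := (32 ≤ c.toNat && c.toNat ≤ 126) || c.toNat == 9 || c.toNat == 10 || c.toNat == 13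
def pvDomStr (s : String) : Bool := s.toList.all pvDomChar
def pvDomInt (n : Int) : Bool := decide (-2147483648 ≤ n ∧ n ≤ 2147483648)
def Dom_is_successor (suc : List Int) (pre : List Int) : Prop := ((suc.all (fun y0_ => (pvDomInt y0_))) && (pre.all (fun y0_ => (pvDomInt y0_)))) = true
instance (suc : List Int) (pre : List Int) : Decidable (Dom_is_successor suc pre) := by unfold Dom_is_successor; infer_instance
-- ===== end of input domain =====

-- B replaces A's flag-carrying scan of the 26 differences by generate-and-test:
-- build each candidate "pre with one count incremented" and check whether suc
-- equals any of them; an alternative algorithm of similar (small) cost.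

-- ===== PORT A =====
-- for i in range(26) with early returns: structural recursion on the index,
-- pyGet? none = IndexError (those inputs are excluded by Pre_).
def isSuccLoopA (suc : List Int) (pre : List Int) (d : Bool) (i : Nat) : Bool :=
  if i < 26 then
    match PySem.List.pyGet? suc (i : Int), PySem.List.pyGet? pre (i : Int) with
    | some s, some p =>
      if s - p = 1 then
        if d then false else isSuccLoopA suc pre true (i + 1)
      else if s - p = 0 then isSuccLoopA suc pre d (i + 1)
      else false
    | _, _ => false  -- IndexError in Python; outside Pre_
  else d

def is_successor (suc : List Int) (pre : List Int) : Bool :=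
  isSuccLoopA suc pre false 0

-- ===== PORT B =====
-- b[:i] + [b[i] + 1] + b[i+1:] with 0 ≤ i < len(b): take/getD/drop are exact here.
def pvCand (b : List Int) (i : Nat) : List Int :=
  b.take i ++ [b.getD i 0 + 1] ++ b.drop (i + 1)

-- any(a == candidate for i in range(len(b))) over a = suc[:26], b = pre[:26]
def is_successor_alt (suc : List Int) (pre : List Int) : Bool :=
  let a := suc.take 26
  let b := pre.take 26
  (List.range b.length).any (fun i => a == pvCand b i)

-- ===== PRECONDITION & SPEC =====
-- Pre_ excludes exactly the inputs where A raises IndexError: some index below 26 is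
-- missing and the loop never returns early before reaching it (the available prefix
-- differences are all 0/1 with at most one 1).
def Pre_is_successor (suc : List Int) (pre : List Int) : Prop :=
  (26 ≤ suc.length ∧ 26 ≤ pre.length) ∨
    (¬ ∀ d ∈ (List.zipWith (fun s p => s - p) suc pre).take 26, d = 0 ∨ d = 1) ∨
    2 ≤ ((List.zipWith (fun s p => s - p) suc pre).take 26).count 1
instance (suc : List Int) (pre : List Int) : Decidable (Pre_is_successor suc pre) := by
  unfold Pre_is_successor; infer_instance

def pvWitness_is_successor : List Int × List Int :=
  ([1,0,0,0,0,0,0,0,0,0,0,0,0,0,0,0,0,0,0,0,0,0,0,0,0,0],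
   [0,0,0,0,0,0,0,0,0,0,0,0,0,0,0,0,0,0,0,0,0,0,0,0,0,0])

def Spec_is_successor (suc : List Int) (pre : List Int) (out : Bool) : Prop := out = is_successor_alt suc pre
instance (suc : List Int) (pre : List Int) (out : Bool) : Decidable (Spec_is_successor suc pre out) := by unfold Spec_is_successor; infer_instance

-- ===== CLAIM (what is proved, stated in full; the proofs are below) =====
def Claim_equal_is_successor : Prop := ∀ (suc : List Int) (pre : List Int), Dom_is_successor suc pre → Pre_is_successor suc pre → Spec_is_successor suc pre (is_successor suc pre)

-- ===== LEMMAS AND PROOFS =====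

-- the difference vector both sides are characterised through
def pvDs (suc : List Int) (pre : List Int) : List Int :=
  List.zipWith (fun s p => s - p) (suc.take 26) (pre.take 26)

lemma pvDs_eq (suc pre : List Int) :
    pvDs suc pre = (List.zipWith (fun s p => s - p) suc pre).take 26 := by
  simp [pvDs, List.take_zipWith]

lemma pvDs_length (suc pre : List Int) :
    (pvDs suc pre).length = min (min suc.length pre.length) 26 := by
  simp [pvDs, Nat.min_comm, Nat.min_assoc, Nat.min_left_comm]

lemma pvDs_get (suc pre : List Int) (i : Nat) (h : i < (pvDs suc pre).length)
    (hs : i < suc.length) (hp : i < pre.length) :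
    (pvDs suc pre)[i] = suc[i] - pre[i] := by
  simp [pvDs]

-- A's loop characterised on long inputs
lemma loopA_char (suc pre : List Int) (hs : 26 ≤ suc.length) (hp : 26 ≤ pre.length) :
    ∀ k i d, i + k = 26 →
      isSuccLoopA suc pre d i =
        (((pvDs suc pre).drop i).all (fun x => x == 0 || x == 1) &&
          ((pvDs suc pre).drop i).count 1 + (if d then 1 else 0) == 1) := by
  have hlen : (pvDs suc pre).length = 26 := by
    rw [pvDs_length]; omega
  intro k
  induction k with
  | zero =>
    intro i d hi
    have : i = 26 := by omega
    subst this
    rw [isSuccLoopA]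
    simp [List.drop_eq_nil_of_le (by omega : (pvDs suc pre).length ≤ 26)]
    cases d <;> simp
  | succ k ih =>
    intro i d hi
    have hi26 : i < 26 := by omega
    have hds : i < (pvDs suc pre).length := by omega
    have h1 : PySem.List.pyGet? suc (i : Int) = some suc[i] := by
      rw [PySem.List.pyGet?_natCast]; simp [List.getElem?_eq_getElem (by omega : i < suc.length)]
    have h2 : PySem.List.pyGet? pre (i : Int) = some pre[i] := by
      rw [PySem.List.pyGet?_natCast]; simp [List.getElem?_eq_getElem (by omega : i < pre.length)]
    have hdrop : (pvDs suc pre).drop i = (pvDs suc pre)[i] :: (pvDs suc pre).drop (i + 1) :=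
      (List.getElem_cons_drop hds).symm
    have hget : (pvDs suc pre)[i] = suc[i] - pre[i] := pvDs_get _ _ _ hds (by omega) (by omega)
    rw [isSuccLoopA]
    simp only [hi26, if_pos, h1, h2]
    rw [hdrop, hget]
    by_cases e1 : suc[i] - pre[i] = 1
    · cases d <;>
        simp [e1, ih (i + 1) _ (by omega)]
    · by_cases e0 : suc[i] - pre[i] = 0
      · simp [e0, ih (i + 1) d (by omega)]
      · have hne : ¬ (suc[i] - pre[i] == 0 || suc[i] - pre[i] == 1) = true := by
          simp [e0, e1]
        simp [e1, e0, hne]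

-- A is false whenever some index below 26 is missing
lemma loopA_short (suc pre : List Int) (hm : min suc.length pre.length < 26) :
    ∀ k i d, i + k = min suc.length pre.length → isSuccLoopA suc pre d i = false := by
  intro k
  induction k with
  | zero =>
    intro i d hi
    have hi26 : i < 26 := by omega
    rw [isSuccLoopA]
    simp only [hi26, if_pos]
    have hor : suc.length ≤ i ∨ pre.length ≤ i := by omega
    rcases hor with h | h
    · have hn : PySem.List.pyGet? suc (i : Int) = none := by
        rw [PySem.List.pyGet?_natCast]; exact List.getElem?_eq_none h
      rw [hn]
    · have hn : PySem.List.pyGet? pre (i : Int) = none := by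
        rw [PySem.List.pyGet?_natCast]; exact List.getElem?_eq_none h
      rw [hn]
      cases hx : PySem.List.pyGet? suc (i : Int) <;> rfl
  | succ k ih =>
    intro i d hi
    have hi26 : i < 26 := by omega
    obtain ⟨s, hs⟩ : ∃ s, PySem.List.pyGet? suc (i : Int) = some s := by
      rw [PySem.List.pyGet?_natCast]
      exact ⟨_, List.getElem?_eq_getElem (by omega : i < suc.length)⟩
    obtain ⟨p, hp⟩ : ∃ p, PySem.List.pyGet? pre (i : Int) = some p := by
      rw [PySem.List.pyGet?_natCast]
      exact ⟨_, List.getElem?_eq_getElem (by omega : i < pre.length)⟩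
    rw [isSuccLoopA]
    simp only [hi26, if_pos, hs, hp]
    by_cases e1 : s - p = 1
    · cases d
      · simp [e1, ih (i + 1) true (by omega)]
      · simp [e1]
    · by_cases e0 : s - p = 0
      · simp [e0, ih (i + 1) d (by omega)]
      · simp [e1, e0]

-- B unfolded to an existential over candidates
lemma altB_iff (suc pre : List Int) :
    is_successor_alt suc pre = true ↔
      ∃ i < (pre.take 26).length, suc.take 26 = pvCand (pre.take 26) i := by
  simp [is_successor_alt]

lemma zipWith_sub_self (l : List Int) :
    List.zipWith (fun s p => s - p) l l = List.replicate l.length 0 := by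
  induction l with
  | nil => simp
  | cons x t ih => simp [List.replicate_succ]

-- a matching candidate forces the difference vector to be 0…010…0
lemma zip_sub_mid (x u v : List Int) (c d : Int) :
    List.zipWith (fun s p => s - p) (x ++ c :: u) (x ++ d :: v) =
      List.replicate x.length 0 ++ (c - d) :: List.zipWith (fun s p => s - p) u v := by
  induction x with
  | nil => simp
  | cons h t ih => simp [ih, List.replicate_succ]

-- a matching candidate forces the difference vector to be 0…010…0
lemma cand_to_split (a b : List Int) (i : Nat) (hi : i < b.length)
    (h : a = pvCand b i) :
    List.zipWith (fun s p => s - p) a b =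
      List.replicate i 0 ++ 1 :: List.replicate (b.length - i - 1) 0 := by
  have hb : b = b.take i ++ b[i] :: b.drop (i + 1) := by
    conv_lhs => rw [← List.take_append_drop i b]
    rw [← List.getElem_cons_drop hi]
  have hd : b.getD i 0 = b[i] := List.getD_eq_getElem b 0 hi
  have ha' : a = b.take i ++ (b[i] + 1) :: b.drop (i + 1) := by
    rw [h, pvCand, hd]; simp
  have hstep : List.zipWith (fun s p => s - p) a b =
      List.zipWith (fun s p => s - p)
        (b.take i ++ (b[i] + 1) :: b.drop (i + 1))
        (b.take i ++ b[i] :: b.drop (i + 1)) :=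
    congrArg₂ _ ha' hb
  rw [hstep, zip_sub_mid]
  rw [zipWith_sub_self]
  have h1 : (b.take i).length = i := by rw [List.length_take]; omega
  have h2 : (b.drop (i + 1)).length = b.length - i - 1 := by simp; omega
  rw [h1, h2]
  norm_num

-- recovering a from the difference vector
lemma zip_add_cancel (a : List Int) : ∀ (b : List Int), a.length = b.length →
    List.zipWith (fun d p => d + p) (List.zipWith (fun s p => s - p) a b) b = a := by
  induction a with
  | nil => intro b _; simp
  | cons x t ih =>
    intro b h
    cases b with
    | nil => simp at h
    | cons y u => simp [ih u (by simpa using h)]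

lemma zip_add_zero (l : List Int) :
    List.zipWith (fun d p => d + p) (List.replicate l.length 0) l = l := by
  induction l with
  | nil => simp
  | cons x t ih => simp [List.replicate_succ, ih]

lemma zip_add_zero' (n : Nat) (l : List Int) (h : n = l.length) :
    List.zipWith (fun d p => d + p) (List.replicate n 0) l = l := by
  subst h; exact zip_add_zero l

-- and conversely: diffs all 0/1 with exactly one 1 give a matching candidate
lemma split_to_cand (a b : List Int) (hlen : a.length = b.length)
    (hall : ∀ d ∈ List.zipWith (fun s p => s - p) a b, d = 0 ∨ d = 1)
    (hcnt : (List.zipWith (fun s p => s - p) a b).count 1 = 1) :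
    ∃ i < b.length, a = pvCand b i := by
  set ds := List.zipWith (fun s p => s - p) a b with hds
  have hdsl : ds.length = b.length := by simp [hds, hlen]
  have hmem : (1 : Int) ∈ ds := List.count_pos_iff.mp (by omega)
  obtain ⟨xs, ys, hsplit⟩ := List.append_of_mem hmem
  have hcnt' : xs.count 1 = 0 ∧ ys.count 1 = 0 := by
    have := hcnt
    rw [hsplit] at this
    simp [List.count_append] at this
    omega
  have hx : xs = List.replicate xs.length (0 : Int) := by
    rw [List.eq_replicate_iff]
    refine ⟨rfl, fun d hd => ?_⟩
    have h01 := hall d (by rw [hsplit]; exact List.mem_append_left _ hd)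
    rcases h01 with h | h
    · exact h
    · exact absurd (List.count_pos_iff.mpr (h ▸ hd)) (by omega)
  have hy : ys = List.replicate ys.length (0 : Int) := by
    rw [List.eq_replicate_iff]
    refine ⟨rfl, fun d hd => ?_⟩
    have h01 := hall d (by rw [hsplit]; exact List.mem_append_right _ (List.mem_cons_of_mem _ hd))
    rcases h01 with h | h
    · exact h
    · exact absurd (List.count_pos_iff.mpr (h ▸ hd)) (by omega)
  have hL : ds.length = xs.length + 1 + ys.length := by simp [hsplit]; omega
  refine ⟨xs.length, by omega, ?_⟩
  have hib : xs.length < b.length := by omega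
  have htl : (b.take xs.length).length = xs.length := by rw [List.length_take]; omega
  have hb : b = b.take xs.length ++ b[xs.length] :: b.drop (xs.length + 1) := by
    conv_lhs => rw [← List.take_append_drop xs.length b]
    rw [← List.getElem_cons_drop hib]
  have ha := zip_add_cancel a b hlen
  rw [← hds] at ha
  rw [← ha, hsplit]
  conv_lhs => rw [hx, hy, hb]
  rw [List.zipWith_append (by rw [List.length_replicate, htl])]
  have p1 : List.zipWith (fun d p : Int => d + p)
      (List.replicate xs.length 0) (b.take xs.length) = b.take xs.length :=
    zip_add_zero' _ _ htl.symm
  have p2 : List.zipWith (fun d p : Int => d + p)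
      (List.replicate ys.length 0) (b.drop (xs.length + 1)) = b.drop (xs.length + 1) :=
    zip_add_zero' _ _ (by rw [List.length_drop]; omega)
  rw [List.zipWith_cons_cons, p1, p2, pvCand, List.getD_eq_getElem b 0 hib]
  rw [Int.add_comm 1]
  simp [List.append_assoc]

-- ===== VERDICT (by name: the statement is the Claim_ definition above) =====
theorem is_successor_spec : Claim_equal_is_successor := by
  intro suc pre _hdom hpre
  unfold Spec_is_successor
  have hdsab : pvDs suc pre = List.zipWith (fun s p => s - p) (suc.take 26) (pre.take 26) := rfl
  by_cases hlong : 26 ≤ suc.length ∧ 26 ≤ pre.length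
  · have hA := loopA_char suc pre hlong.1 hlong.2 26 0 false rfl
    simp only [List.drop_zero] at hA
    have hal : (suc.take 26).length = 26 := by rw [List.length_take]; omega
    have hbl : (pre.take 26).length = 26 := by rw [List.length_take]; omega
    by_cases hex : ∃ i < (pre.take 26).length, suc.take 26 = pvCand (pre.take 26) i
    · obtain ⟨i, hi, hc⟩ := hex
      have hsplit := cand_to_split _ _ i hi hc
      rw [← hdsab] at hsplit
      have hall : (pvDs suc pre).all (fun x => x == 0 || x == 1) = true := by
        rw [hsplit]
        simp only [List.all_eq_true]
        intro d hd
        simp only [List.mem_append, List.mem_cons, List.mem_replicate] at hd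
        rcases hd with ⟨_, h⟩ | h | ⟨_, h⟩ <;> simp [h]
      have hcount : (pvDs suc pre).count 1 = 1 := by
        rw [hsplit]
        simp [List.count_append, List.count_replicate]
      rw [show is_successor suc pre = isSuccLoopA suc pre false 0 from rfl, hA,
        hall, hcount]
      have hB : is_successor_alt suc pre = true := (altB_iff suc pre).mpr ⟨i, hi, hc⟩
      rw [hB]
      simp
    · have hB : is_successor_alt suc pre = false := by
        rcases hb : is_successor_alt suc pre with _ | _
        · rfl
        · exact absurd ((altB_iff suc pre).mp hb) hex
      rw [hB, show is_successor suc pre = isSuccLoopA suc pre false 0 from rfl, hA]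
      rcases hallc : (pvDs suc pre).all (fun x => x == 0 || x == 1) with _ | _
      · simp
      · rcases eq_or_ne ((pvDs suc pre).count 1) 1 with hc1 | hc1
        · exfalso
          apply hex
          apply split_to_cand _ _ (by omega)
          · intro d hd
            have := (List.all_eq_true.mp hallc) d (by rw [hdsab]; exact hd)
            rcases (by simpa using this) with h | h
            · exact Or.inl h
            · exact Or.inr h
          · rw [← hdsab]; exact hc1
        · simp [hc1]
  · have hm : min suc.length pre.length < 26 := by omega
    have hAfalse : is_successor suc pre = false :=
      loopA_short suc pre hm (min suc.length pre.length) 0 false (by omega)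
    have hB : is_successor_alt suc pre = false := by
      rcases hb : is_successor_alt suc pre with _ | _
      · rfl
      · exfalso
        obtain ⟨i, hi, hc⟩ := (altB_iff suc pre).mp hb
        have hsplit := cand_to_split _ _ i hi hc
        rw [← hdsab] at hsplit
        have hall' : ∀ d ∈ pvDs suc pre, d = 0 ∨ d = 1 := by
          rw [hsplit]
          intro d hd
          simp only [List.mem_append, List.mem_cons, List.mem_replicate] at hd
          rcases hd with ⟨_, h⟩ | h | ⟨_, h⟩ <;> simp [h]
        have hcount' : (pvDs suc pre).count 1 = 1 := by
          rw [hsplit]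
          simp [List.count_append, List.count_replicate]
        rw [pvDs_eq] at hall' hcount'
        rcases hpre with h | h | h
        · exact absurd h hlong
        · exact h hall'
        · omega
    rw [hAfalse, hB]
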